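-- pv_equiv track=rewrite | github.com/Enjef/Algo | 1000 - 1099/1003 - Check If Word Is Valid After Substitutions/1003 - Check If Word Is Valid After Substitutions.py | isValid_v2
-- ===== SOURCE A (Python) =====
-- def isValid_v2(s: str) -> bool:  # 45.97% 22.99%
--     stack = []
--     for char in s:
--         if char == 'c' and stack[-2:] == ['a', 'b']:
--             stack.pop()
--             stack.pop()
--         else:
--             stack.append(char)
--     return not stack
-- ===== SOURCE B (Python) =====
-- def isValid_v2(s: str) -> bool:
--     while 'abc' in s:
--         s = s.replace('abc', '')
--     return s == ''
-- ===== Notes on version B (the rewrite author's own statement) =====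
-- stated objective: simpler
-- what changed: Replaced the character-by-character stack simulation with repeated whole-string rewriting to a fixed point: delete every 'abc' occurrence until none remains, then test for the empty string.
import Mathlib
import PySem

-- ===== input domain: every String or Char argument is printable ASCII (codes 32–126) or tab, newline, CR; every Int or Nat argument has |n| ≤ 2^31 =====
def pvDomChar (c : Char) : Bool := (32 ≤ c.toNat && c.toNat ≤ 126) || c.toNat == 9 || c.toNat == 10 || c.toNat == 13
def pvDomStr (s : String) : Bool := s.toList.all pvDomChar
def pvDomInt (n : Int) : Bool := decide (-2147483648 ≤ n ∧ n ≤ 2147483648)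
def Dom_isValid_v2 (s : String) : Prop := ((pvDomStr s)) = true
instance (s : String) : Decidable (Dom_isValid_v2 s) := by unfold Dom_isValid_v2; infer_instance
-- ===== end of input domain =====

-- B rewrites the string to a fixed point (repeatedly deleting 'abc') instead of simulating a stack; objective: simpler.

-- ===== PORT A =====
-- one iteration of A's for-loop body: the stack update for one character
def pushPop (stack : List Char) (c : Char) : List Char :=
  if c == 'c' && (PySem.List.slice stack (some (-2)) none == ['a', 'b']) then
    stack.dropLast.dropLast          -- stack.pop(); stack.pop()
  else
    stack ++ [c]                     -- stack.append(char)

def isValid_v2 (s : String) : Bool :=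
  (s.toList.foldl pushPop []).isEmpty    -- return not stack

-- ===== PORT B =====
-- proof-side description of the value of s.replace('abc', ''); needed above the port
-- because B's while-loop cites it for termination
def removeAbc : List Char → List Char
  | [] => []
  | c :: t =>
    if List.isPrefixOf ['a', 'b', 'c'] (c :: t) then removeAbc (t.drop 2)
    else c :: removeAbc t
termination_by l => l.length
decreasing_by
  all_goals simp [List.length_drop, List.length_cons]

theorem go_eq_removeAbc (fuel : Nat) (l acc : List Char) (h : l.length ≤ fuel) :
    PySem.Chars.replace.go ['a', 'b', 'c'] [] fuel l acc = acc.reverse ++ removeAbc l := by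
  induction fuel generalizing l acc with
  | zero =>
    have : l = [] := List.length_eq_zero_iff.mp (by omega)
    subst this
    simp [PySem.Chars.replace.go, removeAbc]
  | succ n ih =>
    match l with
    | [] => simp [PySem.Chars.replace.go, removeAbc]
    | c :: t =>
      rw [PySem.Chars.replace.go, removeAbc]
      by_cases hp : List.isPrefixOf ['a', 'b', 'c'] (c :: t)
      · simp only [hp, if_pos]
        obtain ⟨rest, hrest⟩ := List.isPrefixOf_iff_prefix.mp hp
        have hc : c = 'a' ∧ t = 'b' :: 'c' :: rest := by
          cases hrest; exact ⟨rfl, rfl⟩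
        obtain ⟨rfl, rfl⟩ := hc
        have := ih rest acc (by simp at h ⊢; omega)
        simpa using this
      · rw [if_neg hp, if_neg hp, ih t (c :: acc) (by simp at h ⊢; omega)]
        simp

theorem replace_eq_removeAbc (l : List Char) :
    PySem.Chars.replace l ['a', 'b', 'c'] [] = removeAbc l := by
  rw [PySem.Chars.replace]
  simp [go_eq_removeAbc l.length l [] (le_refl _)]

theorem removeAbc_length_le (l : List Char) : (removeAbc l).length ≤ l.length := by
  induction l using removeAbc.induct with
  | case1 => simp [removeAbc]
  | case2 c t hp ih =>
    rw [removeAbc, if_pos hp]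
    simp [List.length_drop] at ih ⊢
    omega
  | case3 c t hp ih =>
    rw [removeAbc, if_neg hp]
    simpa using ih

theorem removeAbc_length_lt (l : List Char) (h : ['a', 'b', 'c'] <:+: l) :
    (removeAbc l).length < l.length := by
  induction l using removeAbc.induct with
  | case1 => simp at h
  | case2 c t hp ih =>
    rw [removeAbc, if_pos hp]
    obtain ⟨rest, hrest⟩ := List.isPrefixOf_iff_prefix.mp hp
    have := removeAbc_length_le (t.drop 2)
    cases hrest
    simp at this ⊢
    omega
  | case3 c t hp ih =>
    rw [removeAbc, if_neg hp]
    have ht : ['a', 'b', 'c'] <:+: t := by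
      rcases (List.infix_cons_iff).mp h with hpre | ht
      · exact absurd (List.isPrefixOf_iff_prefix.mpr hpre) hp
      · exact ht
    simpa using ih ht

-- B's while-loop: while 'abc' in s: s = s.replace('abc', ''); then return s == ''
def validLoop (cs : List Char) : Bool :=
  if PySem.Chars.isIn ['a', 'b', 'c'] cs then
    validLoop (PySem.Chars.replace cs ['a', 'b', 'c'] [])
  else
    decide (cs = [])
termination_by cs.length
decreasing_by
  rw [replace_eq_removeAbc]
  exact removeAbc_length_lt cs ((PySem.Chars.isIn_iff_infix _ _).mp (by assumption))

def isValid_v2_alt (s : String) : Bool := validLoop s.toList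

-- ===== PRECONDITION & SPEC =====
def Spec_isValid_v2 (s : String) (out : Bool) : Prop := out = isValid_v2_alt s
instance (s : String) (out : Bool) : Decidable (Spec_isValid_v2 s out) := by unfold Spec_isValid_v2; infer_instance

-- ===== CLAIM (what is proved, stated in full; the proofs are below) =====
def Claim_equal_isValid_v2 : Prop := ∀ (s : String), Dom_isValid_v2 s → Spec_isValid_v2 s (isValid_v2 s)

-- ===== LEMMAS AND PROOFS =====

-- processing 'a','b','c' in a row leaves the stack unchanged
theorem foldl_pushPop_abc (st : List Char) :
    List.foldl pushPop st ['a', 'b', 'c'] = st := by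
  have h1 : pushPop st 'a' = st ++ ['a'] := by simp [pushPop]
  have h2 : pushPop (st ++ ['a']) 'b' = st ++ ['a', 'b'] := by simp [pushPop]
  have h3 : pushPop (st ++ ['a', 'b']) 'c' = st := by
    have hs : PySem.List.slice (st ++ ['a', 'b']) (some (-2)) none = ['a', 'b'] := by
      rw [PySem.List.slice_from_neg_ofNat _ 2 (by omega)]
      simp
    simp [pushPop, hs]
  simp [List.foldl, h1, h2, h3]

-- deleting 'abc' occurrences (one replace pass) does not change the final stack
theorem foldl_pushPop_removeAbc (l : List Char) (st : List Char) :
    List.foldl pushPop st (removeAbc l) = List.foldl pushPop st l := by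
  induction l using removeAbc.induct generalizing st with
  | case1 => simp [removeAbc]
  | case2 c t hp ih =>
    rw [removeAbc, if_pos hp]
    obtain ⟨rest, hrest⟩ := List.isPrefixOf_iff_prefix.mp hp
    have hc : c = 'a' ∧ t = 'b' :: 'c' :: rest := by
      cases hrest; exact ⟨rfl, rfl⟩
    obtain ⟨rfl, rfl⟩ := hc
    have habc : List.foldl pushPop st ('a' :: 'b' :: 'c' :: rest)
        = List.foldl pushPop st rest := by
      have : ('a' :: 'b' :: 'c' :: rest) = ['a', 'b', 'c'] ++ rest := rfl
      rw [this, List.foldl_append, foldl_pushPop_abc]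
    rw [habc]
    simpa using ih st
  | case3 c t hp ih =>
    rw [removeAbc, if_neg hp]
    simp only [List.foldl_cons]
    exact ih (pushPop st c)

-- on an 'abc'-free remainder the stack only grows
theorem foldl_pushPop_no_abc (l : List Char) (st : List Char)
    (h : ¬ ['a', 'b', 'c'] <:+: (st ++ l)) :
    List.foldl pushPop st l = st ++ l := by
  induction l generalizing st with
  | nil => simp
  | cons c t ih =>
    have hstep : pushPop st c = st ++ [c] := by
      rw [pushPop]
      by_cases hc : (c == 'c' && (PySem.List.slice st (some (-2)) none == ['a', 'b'])) = true
      · exfalso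
        rw [Bool.and_eq_true, beq_iff_eq, beq_iff_eq] at hc
        obtain ⟨rfl, hsl⟩ := hc
        rw [PySem.List.slice_from_neg_ofNat _ 2 (by omega)] at hsl
        apply h
        refine ⟨st.take (st.length - 2), t, ?_⟩
        calc st.take (st.length - 2) ++ ['a', 'b', 'c'] ++ t
            = st.take (st.length - 2) ++ ['a', 'b'] ++ ('c' :: t) := by simp
          _ = st.take (st.length - 2) ++ st.drop (st.length - 2) ++ ('c' :: t) := by rw [hsl]
          _ = st ++ 'c' :: t := by rw [List.take_append_drop]
      · rw [if_neg hc]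
    rw [List.foldl_cons, hstep, ih (st ++ [c]) (by simpa using h)]
    simp

theorem validLoop_eq (l : List Char) :
    validLoop l = decide (List.foldl pushPop [] l = []) := by
  induction l using validLoop.induct with
  | case1 cs hin ih =>
    rw [validLoop, if_pos hin, ih, replace_eq_removeAbc, foldl_pushPop_removeAbc]
  | case2 cs hin =>
    rw [validLoop, if_neg hin]
    have hfree : ¬ ['a', 'b', 'c'] <:+: cs := by
      intro hinf
      exact hin ((PySem.Chars.isIn_iff_infix _ _).mpr hinf)
    rw [foldl_pushPop_no_abc cs [] (by simpa using hfree)]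
    simp

-- ===== VERDICT (by name: the statement is the Claim_ definition above) =====
theorem isValid_v2_spec : Claim_equal_isValid_v2 := by
  intro s _
  unfold Spec_isValid_v2 isValid_v2 isValid_v2_alt
  rw [validLoop_eq]
  cases List.foldl pushPop [] s.toList <;> simp
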